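-- pv_equiv track=rewrite | github.com/ALOHAALOHAALOJHA/FARFAN_MCDPP | scripts/process_catalog_metadata.py | get_semantic_tags
-- ===== SOURCE A (Python) =====
-- def get_semantic_tags(method):
--     """Assign semantic tags based on method name and file path."""
--     name = method.get("canonical_name", "").lower()
--     path = method.get("file_path", "").lower()
--
--     tags = []
--
--     if any(k in name or k in path for k in ["contradiction", "coherence", "consistency"]):
--         tags.extend(["coherence", "evidence"])
--
--     if "temporal" in name or "temporal" in path or "timeline" in name:
--         tags.extend(["temporal", "structural"])
--
--     if any(k in name for k in ["causal", "mechanism", "inference"]):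
--         tags.extend(["causal", "evidence"])
--
--     if any(k in name for k in ["bayesian", "probability", "likelihood"]):
--         tags.extend(["evidence", "numerical"])
--
--     if any(k in name for k in ["extract", "parse"]):
--         if "extract" not in tags:
--             tags.append("structural")
--
--     if any(k in name for k in ["calculate", "compute", "score", "measure"]):
--         if "numerical" not in tags:
--             tags.append("numerical")
--
--     if any(k in name for k in ["policy", "goal", "objective"]):
--         tags.extend(["policy", "structural"])
--
--     if any(k in name for k in ["validate", "verify", "check"]):
--         tags.extend(["evidence", "textual_quality"])
--
--     if "derek_beach" in path:
--         if "causal" not in tags: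
--             tags.append("causal")
--         if "evidence" not in tags:
--             tags.append("evidence")
--
--     if "contradiction_deteccion" in path:
--         if "coherence" not in tags:
--             tags.append("coherence")
--
--     if "scoring" in path:
--         if "numerical" not in tags:
--             tags.append("numerical")
--         if "evidence" not in tags:
--             tags.append("evidence")
--
--     if any(k in name for k in ["quality", "readability", "completeness"]):
--         if "textual_quality" not in tags:
--             tags.append("textual_quality")
--
--     if any(k in name for k in ["aggregate", "combine", "merge"]):
--         if "numerical" not in tags:
--             tags.append("numerical")
--
--     if any(k in name for k in ["report", "summarize", "format"]):
--         if "structural" not in tags: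
--             tags.append("structural")
--
--     if not tags or ("analysis" in path and len(tags) == 0):
--         tags.append("structural")
--
--     return sorted(list(set(tags)))
-- ===== SOURCE B (Python) =====
-- # Per-tag rewrite: instead of accumulating appended tags and then sorting a set,
-- # decide MEMBERSHIP of each possible tag directly (one boolean condition per tag,
-- # derived from the keyword hits) and emit the tags in their fixed sorted order.
-- def get_semantic_tags(method):
--     name = method.get("canonical_name", "").lower()
--     path = method.get("file_path", "").lower()
--
--     def hit(keywords, *haystacks):
--         return any(k in h for k in keywords for h in haystacks)
--
--     contra = hit(["contradiction", "coherence", "consistency"], name, path)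
--     temporal = hit(["temporal"], name, path) or "timeline" in name
--     causal_kw = hit(["causal", "mechanism", "inference"], name)
--     bayes = hit(["bayesian", "probability", "likelihood"], name)
--     validate = hit(["validate", "verify", "check"], name)
--     policy_kw = hit(["policy", "goal", "objective"], name)
--     derek = "derek_beach" in path
--     scoring = "scoring" in path
--
--     # candidate tags in sorted order, each with its membership condition
--     conds = [
--         ("causal", causal_kw or derek),
--         ("coherence", contra or "contradiction_deteccion" in path),
--         ("evidence", contra or causal_kw or bayes or validate or derek or scoring),
--         ("numerical", bayes
--             or hit(["calculate", "compute", "score", "measure"], name)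
--             or scoring
--             or hit(["aggregate", "combine", "merge"], name)),
--         ("policy", policy_kw),
--         ("structural", temporal
--             or hit(["extract", "parse"], name)
--             or policy_kw
--             or hit(["report", "summarize", "format"], name)),
--         ("temporal", temporal),
--         ("textual_quality", validate
--             or hit(["quality", "readability", "completeness"], name)),
--     ]
--     tags = [t for t, c in conds if c]
--     return tags or ["structural"]
-- ===== Notes on version B (the rewrite author's own statement) =====
-- stated objective: alternative
-- what changed: B inverts the computation: instead of A's append-accumulate-then-sorted(set(...)) pipeline, it computes one membership boolean per possible output tag and emits the tags directly in their fixed sorted order (no tag list, no dedup, no sort).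
import Mathlib
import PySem

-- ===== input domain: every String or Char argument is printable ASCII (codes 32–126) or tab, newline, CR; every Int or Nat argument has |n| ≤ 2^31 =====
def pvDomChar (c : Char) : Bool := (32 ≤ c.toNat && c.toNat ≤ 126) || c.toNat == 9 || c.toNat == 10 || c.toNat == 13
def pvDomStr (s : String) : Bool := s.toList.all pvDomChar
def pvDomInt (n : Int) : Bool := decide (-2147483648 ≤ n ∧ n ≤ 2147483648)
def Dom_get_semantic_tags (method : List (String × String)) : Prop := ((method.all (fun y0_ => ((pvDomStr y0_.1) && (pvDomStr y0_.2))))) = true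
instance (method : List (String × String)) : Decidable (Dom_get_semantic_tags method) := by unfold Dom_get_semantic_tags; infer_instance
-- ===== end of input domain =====

-- B computes one membership boolean per possible output tag and emits the tags in their fixed
-- sorted order, instead of A's append-accumulate-then-sorted(set(...)) pipeline (alternative; same cost).

-- ===== PORT A =====
def get_semantic_tags (method : List (String × String)) : List String :=
  let name := PySem.Str.lower ((PySem.Dict.mk method).getD "canonical_name" "")
  let path := PySem.Str.lower ((PySem.Dict.mk method).getD "file_path" "")
  let tags : List String := []
  let tags := if ["contradiction", "coherence", "consistency"].any
      (fun k => PySem.Str.isIn k name || PySem.Str.isIn k path) then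
    tags ++ ["coherence", "evidence"] else tags
  let tags := if PySem.Str.isIn "temporal" name || PySem.Str.isIn "temporal" path ||
      PySem.Str.isIn "timeline" name then
    tags ++ ["temporal", "structural"] else tags
  let tags := if ["causal", "mechanism", "inference"].any (fun k => PySem.Str.isIn k name) then
    tags ++ ["causal", "evidence"] else tags
  let tags := if ["bayesian", "probability", "likelihood"].any (fun k => PySem.Str.isIn k name) then
    tags ++ ["evidence", "numerical"] else tags
  let tags := if ["extract", "parse"].any (fun k => PySem.Str.isIn k name) then
    (if !(tags.contains "extract") then tags ++ ["structural"] else tags) else tags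
  let tags := if ["calculate", "compute", "score", "measure"].any (fun k => PySem.Str.isIn k name) then
    (if !(tags.contains "numerical") then tags ++ ["numerical"] else tags) else tags
  let tags := if ["policy", "goal", "objective"].any (fun k => PySem.Str.isIn k name) then
    tags ++ ["policy", "structural"] else tags
  let tags := if ["validate", "verify", "check"].any (fun k => PySem.Str.isIn k name) then
    tags ++ ["evidence", "textual_quality"] else tags
  let tags := if PySem.Str.isIn "derek_beach" path then
    (let tags := if !(tags.contains "causal") then tags ++ ["causal"] else tags
     if !(tags.contains "evidence") then tags ++ ["evidence"] else tags) else tags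
  let tags := if PySem.Str.isIn "contradiction_deteccion" path then
    (if !(tags.contains "coherence") then tags ++ ["coherence"] else tags) else tags
  let tags := if PySem.Str.isIn "scoring" path then
    (let tags := if !(tags.contains "numerical") then tags ++ ["numerical"] else tags
     if !(tags.contains "evidence") then tags ++ ["evidence"] else tags) else tags
  let tags := if ["quality", "readability", "completeness"].any (fun k => PySem.Str.isIn k name) then
    (if !(tags.contains "textual_quality") then tags ++ ["textual_quality"] else tags) else tags
  let tags := if ["aggregate", "combine", "merge"].any (fun k => PySem.Str.isIn k name) then
    (if !(tags.contains "numerical") then tags ++ ["numerical"] else tags) else tags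
  let tags := if ["report", "summarize", "format"].any (fun k => PySem.Str.isIn k name) then
    (if !(tags.contains "structural") then tags ++ ["structural"] else tags) else tags
  let tags := if tags.isEmpty || (PySem.Str.isIn "analysis" path && tags.length == 0) then
    tags ++ ["structural"] else tags
  PySem.List.sorted (PySem.Set.ofList tags) (fun x => x) false

-- ===== PORT B =====
def get_semantic_tags_alt (method : List (String × String)) : List String :=
  let name := PySem.Str.lower ((PySem.Dict.mk method).getD "canonical_name" "")
  let path := PySem.Str.lower ((PySem.Dict.mk method).getD "file_path" "")
  let hit := fun (keywords haystacks : List String) =>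
    keywords.any (fun k => haystacks.any (fun h => PySem.Str.isIn k h))
  let contra := hit ["contradiction", "coherence", "consistency"] [name, path]
  let temporal := hit ["temporal"] [name, path] || PySem.Str.isIn "timeline" name
  let causal_kw := hit ["causal", "mechanism", "inference"] [name]
  let bayes := hit ["bayesian", "probability", "likelihood"] [name]
  let validate := hit ["validate", "verify", "check"] [name]
  let policy_kw := hit ["policy", "goal", "objective"] [name]
  let derek := PySem.Str.isIn "derek_beach" path
  let scoring := PySem.Str.isIn "scoring" path
  let conds : List (String × Bool) := [
    ("causal", causal_kw || derek),
    ("coherence", contra || PySem.Str.isIn "contradiction_deteccion" path),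
    ("evidence", contra || causal_kw || bayes || validate || derek || scoring),
    ("numerical", bayes
      || hit ["calculate", "compute", "score", "measure"] [name]
      || scoring
      || hit ["aggregate", "combine", "merge"] [name]),
    ("policy", policy_kw),
    ("structural", temporal
      || hit ["extract", "parse"] [name]
      || policy_kw
      || hit ["report", "summarize", "format"] [name]),
    ("temporal", temporal),
    ("textual_quality", validate
      || hit ["quality", "readability", "completeness"] [name]) ]
  let tags := (conds.filter (fun tc => tc.2)).map (fun tc => tc.1)
  if tags.isEmpty then ["structural"] else tags

-- ===== PRECONDITION & SPEC =====
def Spec_get_semantic_tags (method : List (String × String)) (out : List String) : Prop := out = get_semantic_tags_alt method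
instance (method : List (String × String)) (out : List String) : Decidable (Spec_get_semantic_tags method out) := by unfold Spec_get_semantic_tags; infer_instance

-- ===== CLAIM (what is proved, stated in full; the proofs are below) =====
def Claim_equal_get_semantic_tags : Prop := ∀ (method : List (String × String)), Dom_get_semantic_tags method → Spec_get_semantic_tags method (get_semantic_tags method)

-- ===== LEMMAS AND PROOFS =====

-- A-side step combinators (each is definitionally one `let tags := …` step of the port of A)
def Aext (c : Bool) (adds : List String) (l : List String) : List String :=
  if c then l ++ adds else l
def Aguard (c : Bool) (g x : String) (l : List String) : List String :=
  if c then (if !(l.contains g) then l ++ [x] else l) else l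
def Aguard2 (c : Bool) (x y : String) (l : List String) : List String :=
  if c then
    (let t := if !(l.contains x) then l ++ [x] else l
     if !(t.contains y) then t ++ [y] else t) else l
def Afinal (b : Bool) (l : List String) : List String :=
  if l.isEmpty || (b && l.length == 0) then l ++ ["structural"] else l

-- A's tag accumulator, abstracted over the fifteen keyword-hit booleans (definitionally A's chain)
def chainAbs (c1 c2 c3 c4 c5 c6 c7 c8 c9 c10 c11 c12 c13 c14 c15 : Bool) : List String :=
  let l := Aext c1 ["coherence", "evidence"] []
  let l := Aext c2 ["temporal", "structural"] l
  let l := Aext c3 ["causal", "evidence"] l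
  let l := Aext c4 ["evidence", "numerical"] l
  let l := Aguard c5 "extract" "structural" l
  let l := Aguard c6 "numerical" "numerical" l
  let l := Aext c7 ["policy", "structural"] l
  let l := Aext c8 ["evidence", "textual_quality"] l
  let l := Aguard2 c9 "causal" "evidence" l
  let l := Aguard c10 "coherence" "coherence" l
  let l := Aguard2 c11 "numerical" "evidence" l
  let l := Aguard c12 "textual_quality" "textual_quality" l
  let l := Aguard c13 "numerical" "numerical" l
  let l := Aguard c14 "structural" "structural" l
  Afinal c15 l

-- the eight possible output tags, in sorted order
def pvTags : List String :=
  ["causal", "coherence", "evidence", "numerical", "policy", "structural", "temporal", "textual_quality"]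

-- B's per-tag table, abstracted over the eight membership booleans (definitionally B's body)
def fBabs (b1 b2 b3 b4 b5 b6 b7 b8 : Bool) : List String :=
  let conds : List (String × Bool) := [
    ("causal", b1), ("coherence", b2), ("evidence", b3), ("numerical", b4),
    ("policy", b5), ("structural", b6), ("temporal", b7), ("textual_quality", b8) ]
  let tags := (conds.filter (fun tc => tc.2)).map (fun tc => tc.1)
  if tags.isEmpty then ["structural"] else tags

theorem contains_Aext (c : Bool) (adds l : List String) (t : String) :
    (Aext c adds l).contains t = (l.contains t || (c && adds.contains t)) := by
  cases c <;> simp [Aext]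

theorem contains_Aguard_self (c : Bool) (x : String) (l : List String) (t : String) :
    (Aguard c x x l).contains t = (l.contains t || (c && (t == x))) := by
  cases c <;> by_cases hx : l.contains x <;> by_cases ht : t = x <;>
    simp_all [Aguard, beq_iff_eq]

theorem contains_Aguard_of_not (c : Bool) (g x : String) (l : List String) (t : String)
    (h : l.contains g = false) :
    (Aguard c g x l).contains t = (l.contains t || (c && (t == x))) := by
  cases c <;> simp_all [Aguard, Bool.beq_eq_decide_eq]

theorem contains_Aguard2 (c : Bool) (x y : String) (l : List String) (t : String) :
    (Aguard2 c x y l).contains t = (l.contains t || (c && (t == x || t == y))) := by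
  cases c <;> by_cases hxy : y = x <;> by_cases hx : l.contains x <;> by_cases hy : l.contains y <;>
    by_cases htx : t = x <;> by_cases hty : t = y <;>
    simp_all [Aguard2, beq_iff_eq]

theorem contains_Afinal (b : Bool) (l : List String) (t : String) :
    (Afinal b l).contains t = (l.contains t || (l.isEmpty && (t == "structural"))) := by
  cases l <;> cases b <;> simp [Afinal] <;> tauto

theorem isEmpty_Aext (c : Bool) (a : String) (adds l : List String) :
    (Aext c (a :: adds) l).isEmpty = (l.isEmpty && !c) := by
  cases c <;> cases l <;> simp [Aext]

theorem isEmpty_Aguard (c : Bool) (g x : String) (l : List String) :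
    (Aguard c g x l).isEmpty = (l.isEmpty && !c) := by
  cases c <;> cases l <;> simp [Aguard] <;> split <;> simp_all

theorem isEmpty_Aguard2 (c : Bool) (x y : String) (l : List String) :
    (Aguard2 c x y l).isEmpty = (l.isEmpty && !c) := by
  cases c <;> cases l <;> simp [Aguard2] <;> split <;> simp_all <;> split <;> simp_all

theorem prefix_no_extract (c1 c2 c3 c4 : Bool) :
    (Aext c4 ["evidence", "numerical"]
      (Aext c3 ["causal", "evidence"]
        (Aext c2 ["temporal", "structural"]
          (Aext c1 ["coherence", "evidence"] [])))).contains "extract" = false := by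
  simp only [contains_Aext]
  simp

-- A's accumulator membership, tag by tag, as one boolean formula over the fifteen hit booleans
theorem contains_chain (c1 c2 c3 c4 c5 c6 c7 c8 c9 c10 c11 c12 c13 c14 c15 : Bool) (t : String) :
    (chainAbs c1 c2 c3 c4 c5 c6 c7 c8 c9 c10 c11 c12 c13 c14 c15).contains t =
    (false
      || (c1 && (t == "coherence" || t == "evidence"))
      || (c2 && (t == "temporal" || t == "structural"))
      || (c3 && (t == "causal" || t == "evidence"))
      || (c4 && (t == "evidence" || t == "numerical"))
      || (c5 && (t == "structural"))
      || (c6 && (t == "numerical"))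
      || (c7 && (t == "policy" || t == "structural"))
      || (c8 && (t == "evidence" || t == "textual_quality"))
      || (c9 && (t == "causal" || t == "evidence"))
      || (c10 && (t == "coherence"))
      || (c11 && (t == "numerical" || t == "evidence"))
      || (c12 && (t == "textual_quality"))
      || (c13 && (t == "numerical"))
      || (c14 && (t == "structural"))
      || ((!c1 && !c2 && !c3 && !c4 && !c5 && !c6 && !c7 && !c8 && !c9 && !c10 && !c11 && !c12 && !c13 && !c14) && (t == "structural"))) := by
  show (Afinal c15 _).contains t = _
  rw [contains_Afinal, contains_Aguard_self, contains_Aguard_self, contains_Aguard_self,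
    contains_Aguard2, contains_Aguard_self, contains_Aguard2, contains_Aext, contains_Aext,
    contains_Aguard_self, contains_Aguard_of_not _ _ _ _ _ (prefix_no_extract c1 c2 c3 c4),
    contains_Aext, contains_Aext, contains_Aext, contains_Aext,
    isEmpty_Aguard, isEmpty_Aguard, isEmpty_Aguard, isEmpty_Aguard2, isEmpty_Aguard,
    isEmpty_Aguard2, isEmpty_Aext, isEmpty_Aext, isEmpty_Aguard, isEmpty_Aguard,
    isEmpty_Aext, isEmpty_Aext, isEmpty_Aext, isEmpty_Aext]
  simp only [List.contains_cons, List.contains_nil, List.isEmpty_nil, Bool.or_false, Bool.true_and]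

theorem tags_pairwise : pvTags.Pairwise (fun a b : String => a < b) := by
  simp only [pvTags, List.pairwise_cons, List.mem_cons, List.Pairwise.nil]
  refine ⟨?_, ?_⟩ <;> simp_all [String.lt_iff_toList_lt] <;> decide

-- sorted(set(l)) over a universe of sorted distinct tags is just a filter of that universe
theorem sorted_set_eq_filter (l : List String) (h : ∀ x ∈ l, x ∈ pvTags) :
    PySem.List.sorted (PySem.Set.ofList l) (fun x => x) false
      = pvTags.filter (fun t => l.contains t) := by
  apply PySem.List.sorted_eq_of_perm_of_pairwise_lt
  · rw [List.perm_ext_iff_of_nodup (tags_pairwise.nodup.filter _) (PySem.Set.nodup_ofList l)]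
    intro a
    simp only [List.mem_filter, PySem.Set.mem_ofList, List.contains_iff_mem]
    exact ⟨fun ⟨_, hb⟩ => hb, fun hb => ⟨h a hb, hb⟩⟩
  · exact tags_pairwise.filter _

-- the tag-table shape of the filtered universe, checked over all nine booleans at once
set_option maxHeartbeats 1000000 in
theorem assemble : ∀ b1 b2 b3 b4 b5 b6 b7 b8 e : Bool, e = !(b1 || b2 || b3 || b4 || b5 || b6 || b7 || b8) →
    pvTags.filter (fun t =>
      if t == "causal" then b1 else if t == "coherence" then b2 else if t == "evidence" then b3
      else if t == "numerical" then b4 else if t == "policy" then b5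
      else if t == "structural" then (b6 || e) else if t == "temporal" then b7 else b8)
    = fBabs b1 b2 b3 b4 b5 b6 b7 b8 := by decide

-- "A's accumulator is empty" is exactly "none of B's eight tag conditions holds"
set_option maxHeartbeats 1000000 in
theorem taut : ∀ c1 c2 c3 c4 c5 c6 c7 c8 c9 c10 c11 c12 c13 c14 : Bool,
    (!c1 && !c2 && !c3 && !c4 && !c5 && !c6 && !c7 && !c8 && !c9 && !c10 && !c11 && !c12 && !c13 && !c14)
    = !((c3 || c9) || (c1 || c10) || (c1 || c3 || c4 || c8 || c9 || c11) || (c4 || c6 || c11 || c13)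
        || c7 || (c2 || c5 || c7 || c14) || c2 || (c8 || c12)) := by decide

theorem chain_subset (c1 c2 c3 c4 c5 c6 c7 c8 c9 c10 c11 c12 c13 c14 c15 : Bool) :
    ∀ x ∈ chainAbs c1 c2 c3 c4 c5 c6 c7 c8 c9 c10 c11 c12 c13 c14 c15, x ∈ pvTags := by
  intro x hx
  have hc : (chainAbs c1 c2 c3 c4 c5 c6 c7 c8 c9 c10 c11 c12 c13 c14 c15).contains x = true := by
    simpa [List.contains_iff_mem] using hx
  rw [contains_chain] at hc
  simp only [Bool.or_eq_true, Bool.and_eq_true, beq_iff_eq, Bool.false_eq_true] at hc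
  simp only [pvTags, List.mem_cons, List.not_mem_nil]
  tauto

theorem main (c1 c2 c3 c4 c5 c6 c7 c8 c9 c10 c11 c12 c13 c14 c15 : Bool) :
    PySem.List.sorted (PySem.Set.ofList (chainAbs c1 c2 c3 c4 c5 c6 c7 c8 c9 c10 c11 c12 c13 c14 c15)) (fun x => x) false
      = fBabs (c3 || c9) (c1 || c10) (c1 || c3 || c4 || c8 || c9 || c11) (c4 || c6 || c11 || c13)
          c7 (c2 || c5 || c7 || c14) c2 (c8 || c12) := by
  rw [sorted_set_eq_filter _ (chain_subset c1 c2 c3 c4 c5 c6 c7 c8 c9 c10 c11 c12 c13 c14 c15)]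
  rw [List.filter_congr (l := pvTags)
    (q := fun t =>
      if t == "causal" then (c3 || c9) else if t == "coherence" then (c1 || c10)
      else if t == "evidence" then (c1 || c3 || c4 || c8 || c9 || c11)
      else if t == "numerical" then (c4 || c6 || c11 || c13) else if t == "policy" then c7
      else if t == "structural" then ((c2 || c5 || c7 || c14) ||
        (!c1 && !c2 && !c3 && !c4 && !c5 && !c6 && !c7 && !c8 && !c9 && !c10 && !c11 && !c12 && !c13 && !c14))
      else if t == "temporal" then c2 else (c8 || c12))
    (by intro t ht
        fin_cases ht <;> rw [contains_chain] <;> simp)]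
  exact assemble _ _ _ _ _ _ _ _ _ (taut c1 c2 c3 c4 c5 c6 c7 c8 c9 c10 c11 c12 c13 c14)

theorem A_eq (method : List (String × String)) :
    get_semantic_tags method =
      (let name := PySem.Str.lower ((PySem.Dict.mk method).getD "canonical_name" "")
       let path := PySem.Str.lower ((PySem.Dict.mk method).getD "file_path" "")
       PySem.List.sorted
        (PySem.Set.ofList (chainAbs
          (["contradiction", "coherence", "consistency"].any
            (fun k => PySem.Str.isIn k name || PySem.Str.isIn k path))
          (PySem.Str.isIn "temporal" name || PySem.Str.isIn "temporal" path ||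
            PySem.Str.isIn "timeline" name)
          (["causal", "mechanism", "inference"].any (fun k => PySem.Str.isIn k name))
          (["bayesian", "probability", "likelihood"].any (fun k => PySem.Str.isIn k name))
          (["extract", "parse"].any (fun k => PySem.Str.isIn k name))
          (["calculate", "compute", "score", "measure"].any (fun k => PySem.Str.isIn k name))
          (["policy", "goal", "objective"].any (fun k => PySem.Str.isIn k name))
          (["validate", "verify", "check"].any (fun k => PySem.Str.isIn k name))
          (PySem.Str.isIn "derek_beach" path)
          (PySem.Str.isIn "contradiction_deteccion" path)
          (PySem.Str.isIn "scoring" path)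
          (["quality", "readability", "completeness"].any (fun k => PySem.Str.isIn k name))
          (["aggregate", "combine", "merge"].any (fun k => PySem.Str.isIn k name))
          (["report", "summarize", "format"].any (fun k => PySem.Str.isIn k name))
          (PySem.Str.isIn "analysis" path)))
        (fun x => x) false) := rfl

theorem B_eq (method : List (String × String)) :
    get_semantic_tags_alt method =
      (let name := PySem.Str.lower ((PySem.Dict.mk method).getD "canonical_name" "")
       let path := PySem.Str.lower ((PySem.Dict.mk method).getD "file_path" "")
       fBabs
        ((["causal", "mechanism", "inference"].any (fun k => PySem.Str.isIn k name))
          || (PySem.Str.isIn "derek_beach" path))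
        ((["contradiction", "coherence", "consistency"].any
            (fun k => PySem.Str.isIn k name || PySem.Str.isIn k path))
          || (PySem.Str.isIn "contradiction_deteccion" path))
        ((["contradiction", "coherence", "consistency"].any
            (fun k => PySem.Str.isIn k name || PySem.Str.isIn k path))
          || (["causal", "mechanism", "inference"].any (fun k => PySem.Str.isIn k name))
          || (["bayesian", "probability", "likelihood"].any (fun k => PySem.Str.isIn k name))
          || (["validate", "verify", "check"].any (fun k => PySem.Str.isIn k name))
          || (PySem.Str.isIn "derek_beach" path)
          || (PySem.Str.isIn "scoring" path))
        ((["bayesian", "probability", "likelihood"].any (fun k => PySem.Str.isIn k name))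
          || (["calculate", "compute", "score", "measure"].any (fun k => PySem.Str.isIn k name))
          || (PySem.Str.isIn "scoring" path)
          || (["aggregate", "combine", "merge"].any (fun k => PySem.Str.isIn k name)))
        (["policy", "goal", "objective"].any (fun k => PySem.Str.isIn k name))
        ((PySem.Str.isIn "temporal" name || PySem.Str.isIn "temporal" path ||
            PySem.Str.isIn "timeline" name)
          || (["extract", "parse"].any (fun k => PySem.Str.isIn k name))
          || (["policy", "goal", "objective"].any (fun k => PySem.Str.isIn k name))
          || (["report", "summarize", "format"].any (fun k => PySem.Str.isIn k name)))
        (PySem.Str.isIn "temporal" name || PySem.Str.isIn "temporal" path ||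
          PySem.Str.isIn "timeline" name)
        ((["validate", "verify", "check"].any (fun k => PySem.Str.isIn k name))
          || (["quality", "readability", "completeness"].any (fun k => PySem.Str.isIn k name)))) := by
  simp only [get_semantic_tags_alt, fBabs, List.any_cons, List.any_nil, Bool.or_false]

-- ===== VERDICT (by name: the statement is the Claim_ definition above) =====
theorem get_semantic_tags_spec : Claim_equal_get_semantic_tags := by
  intro method _
  unfold Spec_get_semantic_tags
  rw [A_eq, B_eq]
  exact main _ _ _ _ _ _ _ _ _ _ _ _ _ _ _
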